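-- pv_equiv track=rewrite | github.com/sddai/myLeetCode | .ipynb_checkpoints/OD_24-checkpoint.py | file_size
-- ===== SOURCE A (Python) =====
-- from collections import deque, defaultdict
--
-- def file_size(m, n, file_systems):
--     find = dict()
--     children = defaultdict(list)
--     for i in file_systems:
--         if len(i) == 3:
--             id_, size_, child = i[0], i[1], i[2]
--             find[id_] = size_
--             children[id_].append(child)
--         elif len(i) == 2:
--             id_, size_  = i[0], i[1]
--             find[id_] = size_
--     q = deque([n])
--     ans = 0
--     while q:
--         curr = q.popleft()
--         ans += find[curr]
--         if curr not in children:
--             continue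
--         for child in children[curr]:
--             q.append(child)
--     return ans
-- ===== SOURCE B (Python) =====
-- def file_size(m, n, file_systems):
--     find = {}
--     children = {}
--     for row in file_systems:
--         if len(row) == 3:
--             find[row[0]] = row[1]
--             children.setdefault(row[0], []).append(row[2])
--         elif len(row) == 2:
--             find[row[0]] = row[1]
--
--     def total(node):
--         t = find[node]
--         for c in children.get(node, []):
--             t += total(c)
--         return t
--
--     return total(n)
-- ===== Notes on version B (the rewrite author's own statement) =====
-- stated objective: simpler
-- what changed: The explicit deque-driven BFS accumulation loop is replaced by a recursive top-down helper that sums a node's size plus the recursive totals of its children (and defaultdict is replaced by a plain dict with setdefault); the two-phase map build stays.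
import Mathlib
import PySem

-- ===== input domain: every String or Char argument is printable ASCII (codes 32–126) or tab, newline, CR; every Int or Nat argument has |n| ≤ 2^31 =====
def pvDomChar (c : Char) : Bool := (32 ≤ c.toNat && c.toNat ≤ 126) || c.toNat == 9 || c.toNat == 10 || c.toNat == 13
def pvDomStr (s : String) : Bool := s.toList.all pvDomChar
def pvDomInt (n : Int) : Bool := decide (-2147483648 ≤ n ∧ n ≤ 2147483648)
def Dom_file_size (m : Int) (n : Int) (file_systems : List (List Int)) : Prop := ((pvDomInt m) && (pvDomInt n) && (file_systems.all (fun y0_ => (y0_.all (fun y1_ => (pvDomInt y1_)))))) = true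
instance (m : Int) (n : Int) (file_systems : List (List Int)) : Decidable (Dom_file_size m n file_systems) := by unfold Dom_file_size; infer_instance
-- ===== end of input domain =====

-- B replaces A's explicit deque-driven BFS accumulation by a recursive top-down sum (and defaultdict
-- by a plain dict with setdefault); same two-phase build, same return value — objective: simpler.

-- ===== PORT A =====
-- one step of A's build loop over `file_systems`: `find[id_] = size_`, `children[id_].append(child)`;
-- `List.getD i 0` is exact here because it is read only after the length test puts i in range.
def pvStepA (st : PySem.Dict Int Int × PySem.Dict Int (List Int)) (i : List Int) :
    PySem.Dict Int Int × PySem.Dict Int (List Int) :=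
  if i.length = 3 then
    (st.1.insert (i.getD 0 0) (i.getD 1 0),
     st.2.insert (i.getD 0 0) (st.2.getD (i.getD 0 0) [] ++ [i.getD 2 0]))
  else if i.length = 2 then
    (st.1.insert (i.getD 0 0) (i.getD 1 0), st.2)
  else st

def pvBuildA (file_systems : List (List Int)) :
    PySem.Dict Int Int × PySem.Dict Int (List Int) :=
  file_systems.foldl pvStepA (PySem.Dict.empty, PySem.Dict.empty)

-- A's `while q:` loop; `none` = KeyError on `find[curr]` or fuel exhausted.  The fuel merely bounds
-- the number of pops to make the recursion total; under Pre_ it is proved sufficient (pv_bfs_some).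
def pvBfs (fd : PySem.Dict Int Int) (cd : PySem.Dict Int (List Int)) :
    Nat → List Int → Int → Option Int
  | 0, _, _ => none
  | _ + 1, [], ans => some ans
  | f + 1, curr :: rest, ans =>
    match fd.get? curr with
    | none => none
    | some s =>
      match cd.get? curr with
      | none => pvBfs fd cd f rest (ans + s)             -- `if curr not in children: continue`
      | some cs => pvBfs fd cd f (rest ++ cs) (ans + s)  -- append every child to the queue

def pvFuel (file_systems : List (List Int)) : Nat :=
  (file_systems.length + 2) ^ (file_systems.length + 2)

def file_size (m : Int) (n : Int) (file_systems : List (List Int)) : Int :=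
  let st := pvBuildA file_systems
  (pvBfs st.1 st.2 (pvFuel file_systems) [n] 0).getD 0

-- ===== PORT B =====
-- one step of B's build loop: `children.setdefault(row[0], []).append(row[2])` is exactly
-- `modify row0 [] (· ++ [row2])` (get-or-default, append, store back in place).
def pvStepB (st : PySem.Dict Int Int × PySem.Dict Int (List Int)) (row : List Int) :
    PySem.Dict Int Int × PySem.Dict Int (List Int) :=
  match row with
  | [a, s, c] => (st.1.insert a s, st.2.modify a [] (· ++ [c]))
  | [a, s] => (st.1.insert a s, st.2)
  | _ => st

def pvBuildB (file_systems : List (List Int)) :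
    PySem.Dict Int Int × PySem.Dict Int (List Int) :=
  file_systems.foldl pvStepB (PySem.Dict.empty, PySem.Dict.empty)

-- the `for c in children.get(node, [])` loop inside `total`; `g` is the recursive call
def pvDfsList (g : Int → Option Int) : List Int → Int → Option Int
  | [], acc => some acc
  | c :: cs, acc =>
    match g c with
    | none => none
    | some v => pvDfsList g cs (acc + v)

-- B's recursive `total`; `none` = KeyError on `find[node]` or fuel exhausted (RecursionError side);
-- the fuel makes the recursion total and is proved sufficient under Pre_ (pv_dfs_some).
def pvDfs (fd : PySem.Dict Int Int) (cd : PySem.Dict Int (List Int)) :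
    Nat → Int → Option Int
  | 0, _ => none
  | f + 1, node =>
    match fd.get? node with
    | none => none
    | some t => pvDfsList (pvDfs fd cd f) (cd.getD node []) t

def file_size_alt (m : Int) (n : Int) (file_systems : List (List Int)) : Int :=
  let st := pvBuildB file_systems
  (pvDfs st.1 st.2 (pvFuel file_systems) n).getD 0

-- ===== PRECONDITION & SPEC =====
-- the ids that get a size entry: first element of every row of length 2 or 3
def pvKeys (file_systems : List (List Int)) : List Int :=
  file_systems.filterMap (fun r => if r.length = 2 ∨ r.length = 3 then some (r.getD 0 0) else none)

-- the children recorded for id x: third element of every length-3 row whose first element is x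
def pvChild (file_systems : List (List Int)) (x : Int) : List Int :=
  file_systems.foldl
    (fun acc r => if r.length = 3 ∧ r.getD 0 0 = x then acc ++ [r.getD 2 0] else acc) []

-- one saturation step of graph reachability: add every child of a member
def pvStepR (file_systems : List (List Int)) (S : Finset Int) : Finset Int :=
  S ∪ S.biUnion (fun a => (pvChild file_systems a).toFinset)

def pvIter (file_systems : List (List Int)) : Nat → Finset Int → Finset Int
  | 0, S => S
  | k + 1, S => pvIter file_systems k (pvStepR file_systems S)

-- the set of nodes reachable from S (length+1 steps saturate: at most length child ids exist)
def pvReachS (file_systems : List (List Int)) (S : Finset Int) : Finset Int :=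
  pvIter file_systems (file_systems.length + 1) S

-- Pre_ excludes exactly the inputs on which the Python A does not return: a node reachable from n
-- without a size entry (KeyError on `find[curr]`) or a node reachable from n lying on a cycle
-- (the BFS queue never empties).  It is a plain graph condition on the input rows.
def Pre_file_size (m : Int) (n : Int) (file_systems : List (List Int)) : Prop :=
  ∀ x ∈ pvReachS file_systems {n},
    x ∈ pvKeys file_systems ∧ x ∉ pvReachS file_systems (pvChild file_systems x).toFinset

instance (m : Int) (n : Int) (file_systems : List (List Int)) : Decidable (Pre_file_size m n file_systems) := by
  unfold Pre_file_size; infer_instance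

def pvWitness_file_size : Int × Int × List (List Int) := (3, 1, [[1, 5, 2], [2, 7]])

def Spec_file_size (m : Int) (n : Int) (file_systems : List (List Int)) (out : Int) : Prop :=
  out = file_size_alt m n file_systems
instance (m : Int) (n : Int) (file_systems : List (List Int)) (out : Int) : Decidable (Spec_file_size m n file_systems out) := by
  unfold Spec_file_size; infer_instance

-- ===== CLAIM (what is proved, stated in full; the proofs are below) =====
def Claim_equal_file_size : Prop := ∀ (m : Int) (n : Int) (file_systems : List (List Int)), Dom_file_size m n file_systems → Pre_file_size m n file_systems → Spec_file_size m n file_systems (file_size m n file_systems)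

-- ===== LEMMAS AND PROOFS =====

-- ---- the two builds coincide ----
lemma pv_step_eq : pvStepA = pvStepB := by
  funext st i
  match i with
  | [] => rfl
  | [a] => rfl
  | [a, s] => rfl
  | [a, s, c] =>
    simp only [pvStepA, pvStepB, List.length, List.getD]
    norm_num
    simp [PySem.Dict.modify]
  | a :: s :: c :: d :: t =>
    simp only [pvStepA, pvStepB, List.length]
    rw [if_neg (by omega), if_neg (by omega)]

lemma pv_build_eq (fs : List (List Int)) : pvBuildA fs = pvBuildB fs := by
  unfold pvBuildA pvBuildB; rw [pv_step_eq]

-- ---- find-dict keys ----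
lemma pv_keys_cons (r : List Int) (t : List (List Int)) (x : Int) :
    x ∈ pvKeys (r :: t) ↔ ((r.length = 2 ∨ r.length = 3) ∧ x = r.getD 0 0) ∨ x ∈ pvKeys t := by
  simp only [pvKeys, List.filterMap_cons]
  by_cases h : r.length = 2 ∨ r.length = 3 <;> simp [h, eq_comm]

lemma pv_find_isSome (fs : List (List Int)) :
    ∀ (st : PySem.Dict Int Int × PySem.Dict Int (List Int)) (x : Int),
    ((fs.foldl pvStepB st).1.get? x).isSome = true ↔ x ∈ pvKeys fs ∨ (st.1.get? x).isSome = true := by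
  induction fs with
  | nil => intro st x; simp [pvKeys]
  | cons r t ih =>
    intro st x
    rw [List.foldl_cons, ih, pv_keys_cons]
    match r with
    | [] => simp [pvStepB]
    | [a] => simp [pvStepB]
    | [a, s] =>
      simp only [pvStepB, PySem.Dict.get?_insert, List.getD, List.length]
      by_cases hxa : x = a <;> simp [hxa]
    | [a, s, c] =>
      simp only [pvStepB, PySem.Dict.get?_insert, List.getD, List.length]
      by_cases hxa : x = a <;> simp [hxa]
    | a :: s :: c :: d :: u => simp [pvStepB]

lemma pv_find_key (fs : List (List Int)) (x : Int) (hx : x ∈ pvKeys fs) :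
    (((pvBuildB fs).1.get? x)).isSome = true := by
  unfold pvBuildB
  rw [pv_find_isSome]
  exact Or.inl hx

-- ---- pvChild describes the children dict exactly ----
lemma pv_child_foldl (fs : List (List Int)) (x : Int) :
    ∀ (st : PySem.Dict Int Int × PySem.Dict Int (List Int)),
    (fs.foldl pvStepB st).2.getD x [] =
      fs.foldl (fun acc r => if r.length = 3 ∧ r.getD 0 0 = x then acc ++ [r.getD 2 0] else acc)
        (st.2.getD x []) := by
  induction fs with
  | nil => intro st; rfl
  | cons r t ih =>
    intro st
    rw [List.foldl_cons, List.foldl_cons, ih]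
    congr 1
    match r with
    | [] => simp [pvStepB]
    | [a] => simp [pvStepB]
    | [a, s] => simp [pvStepB, List.length]
    | [a, s, c] =>
      simp only [pvStepB, PySem.Dict.getD_modify, List.length, List.getD]
      by_cases hxa : x = a
      · subst hxa; simp
      · simp [hxa, Ne.symm hxa]
    | a :: s :: c :: d :: u =>
      simp only [pvStepB, List.length]
      rw [if_neg (by omega)]

lemma pv_child_eq (fs : List (List Int)) (x : Int) :
    (pvBuildB fs).2.getD x [] = pvChild fs x := by
  unfold pvBuildB pvChild
  rw [pv_child_foldl]
  simp [PySem.Dict.getD_empty]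

-- generic fact about the pvChild-shaped fold: membership and length
lemma pv_child_gen_mem (fs : List (List Int)) (x y : Int) :
    ∀ (acc : List Int),
    y ∈ fs.foldl (fun acc r => if r.length = 3 ∧ r.getD 0 0 = x then acc ++ [r.getD 2 0] else acc) acc →
    y ∈ acc ∨ ∃ r ∈ fs, r.length = 3 ∧ r.getD 0 0 = x ∧ r.getD 2 0 = y := by
  induction fs with
  | nil => intro acc h; exact Or.inl h
  | cons r t ih =>
    intro acc h
    rw [List.foldl_cons] at h
    rcases ih _ h with hin | ⟨r', hr', h3, h0, h2⟩
    · by_cases hc : r.length = 3 ∧ r.getD 0 0 = x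
      · rw [if_pos hc] at hin
        rcases List.mem_append.mp hin with hm | hm
        · exact Or.inl hm
        · exact Or.inr ⟨r, List.mem_cons_self, hc.1, hc.2, (List.mem_singleton.mp hm).symm⟩
      · rw [if_neg hc] at hin; exact Or.inl hin
    · exact Or.inr ⟨r', List.mem_cons_of_mem _ hr', h3, h0, h2⟩

lemma pv_child_gen_len (fs : List (List Int)) (x : Int) :
    ∀ (acc : List Int),
    (fs.foldl (fun acc r => if r.length = 3 ∧ r.getD 0 0 = x then acc ++ [r.getD 2 0] else acc) acc).length
      ≤ acc.length + fs.length := by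
  induction fs with
  | nil => intro acc; simp
  | cons r t ih =>
    intro acc
    rw [List.foldl_cons]
    refine le_trans (ih _) ?_
    by_cases hc : r.length = 3 ∧ r.getD 0 0 = x
    · rw [if_pos hc]; simp only [List.length_append, List.length_cons, List.length_nil]; omega
    · rw [if_neg hc]; simp only [List.length_cons]; omega

lemma pv_child_len (fs : List (List Int)) (x : Int) : (pvChild fs x).length ≤ fs.length := by
  have := pv_child_gen_len fs x []
  simpa [pvChild] using this

-- all child ids occurring anywhere
def pvKids (fs : List (List Int)) : List Int :=
  fs.filterMap (fun r => if r.length = 3 then some (r.getD 2 0) else none)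

lemma pv_child_sub_kids (fs : List (List Int)) (x y : Int) (h : y ∈ pvChild fs x) :
    y ∈ pvKids fs := by
  rcases pv_child_gen_mem fs x y [] h with h0 | ⟨r, hr, h3, _, h2⟩
  · cases h0
  · exact List.mem_filterMap.mpr ⟨r, hr, by rw [if_pos h3, h2]⟩

-- ---- reachability: basic properties of pvIter ----
lemma pv_subset_stepR (fs : List (List Int)) (S : Finset Int) : S ⊆ pvStepR fs S :=
  Finset.subset_union_left

lemma pv_stepR_mono (fs : List (List Int)) {S T : Finset Int} (h : S ⊆ T) :
    pvStepR fs S ⊆ pvStepR fs T :=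
  Finset.union_subset_union h (Finset.biUnion_subset_biUnion_of_subset_left _ h)

lemma pv_iter_mono (fs : List (List Int)) (k : Nat) :
    ∀ {S T : Finset Int}, S ⊆ T → pvIter fs k S ⊆ pvIter fs k T := by
  induction k with
  | zero => intro S T h; exact h
  | succ j ih => intro S T h; exact ih (pv_stepR_mono fs h)

lemma pv_iter_incl (fs : List (List Int)) (k : Nat) :
    ∀ (S : Finset Int), S ⊆ pvIter fs k S := by
  induction k with
  | zero => intro S; exact subset_rfl
  | succ j ih =>
    intro S
    exact (pv_subset_stepR fs S).trans (ih (pvStepR fs S))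

lemma pv_iter_succ_out (fs : List (List Int)) (k : Nat) :
    ∀ (S : Finset Int), pvIter fs (k + 1) S = pvStepR fs (pvIter fs k S) := by
  induction k with
  | zero => intro S; rfl
  | succ j ih => intro S; exact ih (pvStepR fs S)

lemma pv_iter_closed_sub (fs : List (List Int)) (k : Nat) :
    ∀ {S T : Finset Int}, pvStepR fs T ⊆ T → S ⊆ T → pvIter fs k S ⊆ T := by
  induction k with
  | zero => intro S T _ h; exact h
  | succ j ih =>
    intro S T hT h
    exact ih hT ((pv_stepR_mono fs h).trans hT)

lemma pv_iter_ub (fs : List (List Int)) (k : Nat) (S : Finset Int) :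
    pvIter fs k S ⊆ S ∪ (pvKids fs).toFinset := by
  apply pv_iter_closed_sub fs k _ Finset.subset_union_left
  apply Finset.union_subset subset_rfl
  intro y hy
  rcases Finset.mem_biUnion.mp hy with ⟨a, _, hya⟩
  exact Finset.mem_union_right _
    (List.mem_toFinset.mpr (pv_child_sub_kids fs a y (List.mem_toFinset.mp hya)))

lemma pv_card_iter_ge (fs : List (List Int)) (S : Finset Int) (k : Nat)
    (h : ∀ j < k, pvStepR fs (pvIter fs j S) ≠ pvIter fs j S) :
    S.card + k ≤ (pvIter fs k S).card := by
  induction k with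
  | zero => simp [pvIter]
  | succ j ih =>
    have h1 := ih (fun i hi => h i (by omega))
    have hne := h j (by omega)
    have hsub : pvIter fs j S ⊆ pvStepR fs (pvIter fs j S) := pv_subset_stepR fs _
    have hlt : (pvIter fs j S).card < (pvStepR fs (pvIter fs j S)).card :=
      Finset.card_lt_card ⟨hsub, fun hrev => hne (Finset.Subset.antisymm hrev hsub)⟩
    rw [pv_iter_succ_out]
    omega

lemma pv_fix_propagate (fs : List (List Int)) (S : Finset Int) (j : Nat)
    (hfix : pvStepR fs (pvIter fs j S) = pvIter fs j S) :
    ∀ m, j ≤ m → pvIter fs m S = pvIter fs j S := by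
  intro m hm
  induction m, hm using Nat.le_induction with
  | base => rfl
  | succ g hg ihg => rw [pv_iter_succ_out, ihg, hfix]

lemma pv_reach_fixed (fs : List (List Int)) (S : Finset Int) :
    pvStepR fs (pvReachS fs S) = pvReachS fs S := by
  by_cases hex : ∃ j, j ≤ fs.length + 1 ∧ pvStepR fs (pvIter fs j S) = pvIter fs j S
  · obtain ⟨j, hj, hfix⟩ := hex
    unfold pvReachS
    rw [pv_fix_propagate fs S j hfix _ hj, hfix]
  · push Not at hex
    exfalso
    have hall : ∀ j < fs.length + 2, pvStepR fs (pvIter fs j S) ≠ pvIter fs j S := by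
      intro j hj
      exact hex j (by omega)
    have h1 := pv_card_iter_ge fs S (fs.length + 2) hall
    have h2 : (pvIter fs (fs.length + 2) S).card ≤ S.card + fs.length := by
      calc (pvIter fs (fs.length + 2) S).card
          ≤ (S ∪ (pvKids fs).toFinset).card := Finset.card_le_card (pv_iter_ub fs _ S)
        _ ≤ S.card + (pvKids fs).toFinset.card := Finset.card_union_le _ _
        _ ≤ S.card + (pvKids fs).length := by
            have := (pvKids fs).toFinset_card_le; omega
        _ ≤ S.card + fs.length := by
            have : (pvKids fs).length ≤ fs.length := List.length_filterMap_le _ _; omega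
    omega

lemma pv_reach_closed (fs : List (List Int)) (S : Finset Int) (a : Int)
    (ha : a ∈ pvReachS fs S) (y : Int) (hy : y ∈ pvChild fs a) : y ∈ pvReachS fs S := by
  rw [← pv_reach_fixed fs S]
  exact Finset.mem_union_right _
    (Finset.mem_biUnion.mpr ⟨a, ha, List.mem_toFinset.mpr hy⟩)

lemma pv_self_mem_reach (fs : List (List Int)) (x : Int) : x ∈ pvReachS fs {x} :=
  pv_iter_incl fs _ {x} (Finset.mem_singleton_self x)

lemma pv_reach_min (fs : List (List Int)) {S T : Finset Int}
    (hT : ∀ a ∈ T, ∀ y ∈ pvChild fs a, y ∈ T) (hS : S ⊆ T) : pvReachS fs S ⊆ T := by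
  apply pv_iter_closed_sub fs _ _ hS
  apply Finset.union_subset subset_rfl
  intro y hy
  rcases Finset.mem_biUnion.mp hy with ⟨a, ha, hya⟩
  exact hT a ha y (List.mem_toFinset.mp hya)

lemma pv_reach_child_sub (fs : List (List Int)) {a y : Int} (hy : y ∈ pvChild fs a) :
    pvReachS fs {y} ⊆ pvReachS fs (pvChild fs a).toFinset :=
  pv_iter_mono fs _ (Finset.singleton_subset_iff.mpr (List.mem_toFinset.mpr hy))

lemma pv_reach_sub_parent (fs : List (List Int)) {a y : Int} (hy : y ∈ pvChild fs a) :
    pvReachS fs {y} ⊆ pvReachS fs {a} := by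
  apply pv_reach_min fs (fun b hb z hz => pv_reach_closed fs {a} b hb z hz)
  exact Finset.singleton_subset_iff.mpr
    (pv_reach_closed fs {a} a (pv_self_mem_reach fs a) y hy)

-- ---- rank: the size of a node's reachable set; drops along edges under acyclicity ----
def pvRank (fs : List (List Int)) (x : Int) : Nat := (pvReachS fs {x}).card

lemma pv_rank_lt (fs : List (List Int)) {a y : Int}
    (hacy : a ∉ pvReachS fs (pvChild fs a).toFinset) (hy : y ∈ pvChild fs a) :
    pvRank fs y < pvRank fs a := by
  apply Finset.card_lt_card
  refine ⟨pv_reach_sub_parent fs hy, fun hrev => hacy ?_⟩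
  exact pv_reach_child_sub fs hy (hrev (pv_self_mem_reach fs a))

lemma pv_rank_pos (fs : List (List Int)) (x : Int) : 1 ≤ pvRank fs x :=
  Finset.card_pos.mpr ⟨x, pv_self_mem_reach fs x⟩

lemma pv_rank_le (fs : List (List Int)) (x : Int) : pvRank fs x ≤ fs.length + 1 := by
  unfold pvRank pvReachS
  calc (pvIter fs (fs.length + 1) {x}).card
      ≤ (({x} : Finset Int) ∪ (pvKids fs).toFinset).card :=
        Finset.card_le_card (pv_iter_ub fs _ {x})
    _ ≤ ({x} : Finset Int).card + (pvKids fs).toFinset.card := Finset.card_union_le _ _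
    _ ≤ 1 + fs.length := by
        have h1 := (pvKids fs).toFinset_card_le
        have h2 : (pvKids fs).length ≤ fs.length := List.length_filterMap_le _ _
        simp only [Finset.card_singleton]
        omega
    _ = fs.length + 1 := by omega

-- weight of a queue entry: bounds the number of pops it can still cause
def pvWt (fs : List (List Int)) (x : Int) : Nat := (fs.length + 2) ^ pvRank fs x

-- the (converged) value of B's `total` at a node
def pvVal (fs : List (List Int)) (x : Int) : Int :=
  (pvDfs (pvBuildB fs).1 (pvBuildB fs).2 (pvFuel fs) x).getD 0

-- ---- consequences of Pre_ for nodes reachable from n ----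
lemma pv_child_good (fs : List (List Int)) (n : Int)
    (hP : ∀ x ∈ pvReachS fs {n}, x ∈ pvKeys fs ∧ x ∉ pvReachS fs (pvChild fs x).toFinset)
    (x y : Int) (hx : x ∈ pvReachS fs {n}) (hy : y ∈ (pvBuildB fs).2.getD x []) :
    y ∈ pvReachS fs {n} ∧ pvRank fs y < pvRank fs x := by
  rw [pv_child_eq] at hy
  exact ⟨pv_reach_closed fs {n} x hx y hy, pv_rank_lt fs (hP x hx).2 hy⟩

-- ---- totality and value of B's recursion ----
lemma pv_dfsList_isSome (g : Int → Option Int) :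
    ∀ (l : List Int), (∀ c ∈ l, (g c).isSome = true) → ∀ acc, (pvDfsList g l acc).isSome = true := by
  intro l
  induction l with
  | nil => intro _ acc; simp [pvDfsList]
  | cons c cs ih =>
    intro h acc
    obtain ⟨v, hv⟩ := Option.isSome_iff_exists.mp (h c List.mem_cons_self)
    simp only [pvDfsList, hv]
    exact ih (fun d hd => h d (List.mem_cons_of_mem _ hd)) (acc + v)

lemma pv_dfs_some (fs : List (List Int)) (n : Int)
    (hP : ∀ x ∈ pvReachS fs {n}, x ∈ pvKeys fs ∧ x ∉ pvReachS fs (pvChild fs x).toFinset) :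
    ∀ (f : Nat) (x : Int), x ∈ pvReachS fs {n} → pvRank fs x < f →
    (pvDfs (pvBuildB fs).1 (pvBuildB fs).2 f x).isSome = true := by
  intro f
  induction f with
  | zero => intro x _ h; omega
  | succ g ih =>
    intro x hx hrank
    obtain ⟨s, hs⟩ := Option.isSome_iff_exists.mp (pv_find_key fs x (hP x hx).1)
    simp only [pvDfs, hs]
    apply pv_dfsList_isSome
    intro c hc
    obtain ⟨hcR, hlt⟩ := pv_child_good fs n hP x c hx hc
    exact ih c hcR (by omega)

lemma pv_dfsList_mono (g1 g2 : Int → Option Int)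
    (hg : ∀ c v, g1 c = some v → g2 c = some v) :
    ∀ (l : List Int) (acc v : Int), pvDfsList g1 l acc = some v → pvDfsList g2 l acc = some v := by
  intro l
  induction l with
  | nil => intro acc v h; exact h
  | cons c cs ih =>
    intro acc v h
    simp only [pvDfsList] at h ⊢
    cases hc : g1 c with
    | none => rw [hc] at h; cases h
    | some w =>
      rw [hc] at h
      rw [hg c w hc]
      exact ih _ _ h

lemma pv_dfs_mono_succ (fd : PySem.Dict Int Int) (cd : PySem.Dict Int (List Int)) :
    ∀ (f : Nat) (x v : Int), pvDfs fd cd f x = some v → pvDfs fd cd (f + 1) x = some v := by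
  intro f
  induction f with
  | zero => intro x v h; cases h
  | succ g ih =>
    intro x v h
    simp only [pvDfs] at h ⊢
    cases hs : fd.get? x with
    | none => rw [hs] at h; cases h
    | some s =>
      rw [hs] at h
      exact pv_dfsList_mono _ _ ih _ _ _ h

lemma pv_dfs_mono (fd : PySem.Dict Int Int) (cd : PySem.Dict Int (List Int))
    {f f' : Nat} (hle : f ≤ f') (x v : Int) (h : pvDfs fd cd f x = some v) :
    pvDfs fd cd f' x = some v := by
  induction f', hle using Nat.le_induction with
  | base => exact h
  | succ g hg ih => exact pv_dfs_mono_succ fd cd g x v ih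

lemma pv_dfsList_sum (g : Int → Option Int) (vf : Int → Int) :
    ∀ (l : List Int), (∀ c ∈ l, g c = some (vf c)) →
    ∀ acc, pvDfsList g l acc = some (acc + (l.map vf).sum) := by
  intro l
  induction l with
  | nil => intro _ acc; simp [pvDfsList]
  | cons c cs ih =>
    intro h acc
    simp only [pvDfsList, h c List.mem_cons_self]
    rw [ih (fun d hd => h d (List.mem_cons_of_mem _ hd)) (acc + vf c)]
    simp [add_assoc]

lemma pv_fuel_big (fs : List (List Int)) : fs.length + 3 ≤ pvFuel fs := by
  calc fs.length + 3 ≤ (fs.length + 2) ^ 2 := by nlinarith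
    _ ≤ (fs.length + 2) ^ (fs.length + 2) := Nat.pow_le_pow_right (by omega) (by omega)

lemma pv_dfs_val (fs : List (List Int)) (n : Int)
    (hP : ∀ x ∈ pvReachS fs {n}, x ∈ pvKeys fs ∧ x ∉ pvReachS fs (pvChild fs x).toFinset)
    (x : Int) (hx : x ∈ pvReachS fs {n}) :
    pvDfs (pvBuildB fs).1 (pvBuildB fs).2 (pvFuel fs) x = some (pvVal fs x) := by
  have hrank : pvRank fs x < pvFuel fs := by
    have h1 := pv_rank_le fs x
    have h2 := pv_fuel_big fs
    omega
  obtain ⟨v, hv⟩ := Option.isSome_iff_exists.mp (pv_dfs_some fs n hP (pvFuel fs) x hx hrank)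
  rw [hv]; unfold pvVal; rw [hv]; rfl

lemma pv_val_eq (fs : List (List Int)) (n : Int)
    (hP : ∀ x ∈ pvReachS fs {n}, x ∈ pvKeys fs ∧ x ∉ pvReachS fs (pvChild fs x).toFinset)
    (x : Int) (hx : x ∈ pvReachS fs {n}) (s : Int) (hs : (pvBuildB fs).1.get? x = some s) :
    pvVal fs x = s + (((pvBuildB fs).2.getD x []).map (pvVal fs)).sum := by
  have h1 : 1 ≤ pvFuel fs := by have := pv_fuel_big fs; omega
  have hF : pvFuel fs = (pvFuel fs - 1) + 1 := by omega
  have hchild : ∀ c ∈ (pvBuildB fs).2.getD x [],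
      pvDfs (pvBuildB fs).1 (pvBuildB fs).2 (pvFuel fs - 1) c = some (pvVal fs c) := by
    intro c hc
    obtain ⟨hcR, hlt⟩ := pv_child_good fs n hP x c hx hc
    have hrank : pvRank fs c < pvFuel fs - 1 := by
      have h2 := pv_rank_le fs x
      have h3 := pv_fuel_big fs
      have h4 := pv_rank_le fs c
      omega
    obtain ⟨v, hv⟩ := Option.isSome_iff_exists.mp (pv_dfs_some fs n hP (pvFuel fs - 1) c hcR hrank)
    have := pv_dfs_mono (pvBuildB fs).1 (pvBuildB fs).2 (Nat.sub_le _ _) c v hv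
    rw [pv_dfs_val fs n hP c hcR] at this
    rw [hv, Option.some_inj.mp this]
  have : pvDfs (pvBuildB fs).1 (pvBuildB fs).2 ((pvFuel fs - 1) + 1) x
      = some (s + (((pvBuildB fs).2.getD x []).map (pvVal fs)).sum) := by
    simp only [pvDfs, hs]
    exact pv_dfsList_sum _ _ _ hchild s
  rw [← hF] at this
  rw [pv_dfs_val fs n hP x hx] at this
  exact Option.some_inj.mp this

-- ---- A's BFS: its value is the sum of pvVal over the queue, and it terminates ----
lemma pv_bfs_sum (fs : List (List Int)) (n : Int)
    (hP : ∀ x ∈ pvReachS fs {n}, x ∈ pvKeys fs ∧ x ∉ pvReachS fs (pvChild fs x).toFinset) :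
    ∀ (f : Nat) (q : List Int) (ans r : Int), (∀ x ∈ q, x ∈ pvReachS fs {n}) →
    pvBfs (pvBuildB fs).1 (pvBuildB fs).2 f q ans = some r →
    r = ans + (q.map (pvVal fs)).sum := by
  intro f
  induction f with
  | zero => intro q ans r _ h; cases h
  | succ g ih =>
    intro q ans r hq h
    match q with
    | [] => simp only [pvBfs, Option.some_inj] at h; simp [← h]
    | c :: rest =>
      obtain ⟨s, hs⟩ := Option.isSome_iff_exists.mp
        (pv_find_key fs c (hP c (hq c List.mem_cons_self)).1)
      simp only [pvBfs, hs] at h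
      have hrest : ∀ x ∈ rest, x ∈ pvReachS fs {n} := fun x hx => hq x (List.mem_cons_of_mem _ hx)
      have hvc := pv_val_eq fs n hP c (hq c List.mem_cons_self) s hs
      cases hcd : (pvBuildB fs).2.get? c with
      | none =>
        rw [hcd] at h
        have := ih rest (ans + s) r hrest h
        rw [PySem.Dict.getD_of_get?_eq_none _ _ hcd] at hvc
        simp only [List.map_nil, List.sum_nil, add_zero] at hvc
        simp only [List.map_cons, List.sum_cons]
        omega
      | some cs =>
        rw [hcd] at h
        have hcs : (pvBuildB fs).2.getD c [] = cs := PySem.Dict.getD_of_get?_eq_some _ _ hcd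
        have hall : ∀ x ∈ rest ++ cs, x ∈ pvReachS fs {n} := by
          intro x hx
          rcases List.mem_append.mp hx with hx | hx
          · exact hrest x hx
          · exact (pv_child_good fs n hP c x (hq c List.mem_cons_self) (hcs ▸ hx)).1
        have := ih (rest ++ cs) (ans + s) r hall h
        rw [List.map_append, List.sum_append] at this
        rw [hcs] at hvc
        simp only [List.map_cons, List.sum_cons]
        omega

lemma pv_wt_pos (fs : List (List Int)) (x : Int) : 1 ≤ pvWt fs x :=
  Nat.one_le_two_pow.trans (Nat.pow_le_pow_left (by omega) _)

lemma pv_children_wt (fs : List (List Int)) (n : Int)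
    (hP : ∀ x ∈ pvReachS fs {n}, x ∈ pvKeys fs ∧ x ∉ pvReachS fs (pvChild fs x).toFinset)
    (c : Int) (hc : c ∈ pvReachS fs {n}) :
    ((((pvBuildB fs).2.getD c []).map (pvWt fs)).sum + 1 ≤ pvWt fs c) := by
  have hlen : ((pvBuildB fs).2.getD c []).length ≤ fs.length := by
    rw [pv_child_eq]; exact pv_child_len fs c
  have hbound : ∀ w ∈ ((pvBuildB fs).2.getD c []).map (pvWt fs),
      w ≤ (fs.length + 2) ^ (pvRank fs c - 1) := by
    intro w hw
    obtain ⟨y, hy, rfl⟩ := List.mem_map.mp hw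
    have := (pv_child_good fs n hP c y hc hy).2
    exact Nat.pow_le_pow_right (by omega) (by omega)
  have hsum : (((pvBuildB fs).2.getD c []).map (pvWt fs)).sum
      ≤ ((pvBuildB fs).2.getD c []).length * (fs.length + 2) ^ (pvRank fs c - 1) := by
    have := List.sum_le_card_nsmul (((pvBuildB fs).2.getD c []).map (pvWt fs))
      ((fs.length + 2) ^ (pvRank fs c - 1)) hbound
    simpa [smul_eq_mul] using this
  have hX : 1 ≤ (fs.length + 2) ^ (pvRank fs c - 1) :=
    Nat.one_le_two_pow.trans (Nat.pow_le_pow_left (by omega) _)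
  have hr1 : 1 ≤ pvRank fs c := pv_rank_pos fs c
  have hWc : pvWt fs c = (fs.length + 2) ^ (pvRank fs c - 1) * (fs.length + 2) := by
    unfold pvWt
    rw [← pow_succ]
    congr 1
    omega
  have hlen' : ((pvBuildB fs).2.getD c []).length * (fs.length + 2) ^ (pvRank fs c - 1)
      ≤ fs.length * (fs.length + 2) ^ (pvRank fs c - 1) :=
    Nat.mul_le_mul_right _ hlen
  rw [hWc]
  nlinarith

lemma pv_bfs_some (fs : List (List Int)) (n : Int)
    (hP : ∀ x ∈ pvReachS fs {n}, x ∈ pvKeys fs ∧ x ∉ pvReachS fs (pvChild fs x).toFinset) :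
    ∀ (f : Nat) (q : List Int) (ans : Int), (∀ x ∈ q, x ∈ pvReachS fs {n}) →
    (q.map (pvWt fs)).sum < f →
    (pvBfs (pvBuildB fs).1 (pvBuildB fs).2 f q ans).isSome = true := by
  intro f
  induction f with
  | zero => intro q ans _ h; omega
  | succ g ih =>
    intro q ans hq hwt
    match q with
    | [] => simp [pvBfs]
    | c :: rest =>
      obtain ⟨s, hs⟩ := Option.isSome_iff_exists.mp
        (pv_find_key fs c (hP c (hq c List.mem_cons_self)).1)
      simp only [pvBfs, hs]
      have hrest : ∀ x ∈ rest, x ∈ pvReachS fs {n} := fun x hx => hq x (List.mem_cons_of_mem _ hx)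
      have hwc := pv_wt_pos fs c
      simp only [List.map_cons, List.sum_cons] at hwt
      cases hcd : (pvBuildB fs).2.get? c with
      | none => exact ih rest (ans + s) hrest (by omega)
      | some cs =>
        have hcs : (pvBuildB fs).2.getD c [] = cs := PySem.Dict.getD_of_get?_eq_some _ _ hcd
        apply ih (rest ++ cs) (ans + s)
        · intro x hx
          rcases List.mem_append.mp hx with hx | hx
          · exact hrest x hx
          · exact (pv_child_good fs n hP c x (hq c List.mem_cons_self) (hcs ▸ hx)).1
        · have := pv_children_wt fs n hP c (hq c List.mem_cons_self)
          rw [hcs] at this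
          rw [List.map_append, List.sum_append]
          omega

-- ===== VERDICT (by name: the statement is the Claim_ definition above) =====
theorem file_size_spec : Claim_equal_file_size := by
  intro m n fs _ hP
  unfold Spec_file_size file_size file_size_alt
  rw [pv_build_eq]
  have hn : n ∈ pvReachS fs {n} := pv_self_mem_reach fs n
  have hone : ∀ x ∈ [n], x ∈ pvReachS fs {n} := by intro x hx; simp at hx; exact hx ▸ hn
  have hwt : (([n].map (pvWt fs)).sum) < pvFuel fs := by
    simp only [List.map_cons, List.map_nil, List.sum_cons, List.sum_nil, Nat.add_zero]
    calc pvWt fs n = (fs.length + 2) ^ pvRank fs n := rfl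
      _ ≤ (fs.length + 2) ^ (fs.length + 1) := Nat.pow_le_pow_right (by omega) (pv_rank_le fs n)
      _ < (fs.length + 2) ^ (fs.length + 2) := Nat.pow_lt_pow_right (by omega) (by omega)
  obtain ⟨r, hrn⟩ := Option.isSome_iff_exists.mp
    (pv_bfs_some fs n hP (pvFuel fs) [n] 0 hone hwt)
  have hsum := pv_bfs_sum fs n hP (pvFuel fs) [n] 0 r hone hrn
  simp only [List.map_cons, List.map_nil, List.sum_cons, List.sum_nil, add_zero, zero_add] at hsum
  show (pvBfs (pvBuildB fs).1 (pvBuildB fs).2 (pvFuel fs) [n] 0).getD 0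
      = (pvDfs (pvBuildB fs).1 (pvBuildB fs).2 (pvFuel fs) n).getD 0
  rw [hrn, pv_dfs_val fs n hP n hn]
  simp [hsum]
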